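-- pv_equiv track=rewrite | github.com/Vintage-lavender/programmers-Baekjoon | 프로그래머스/unrated/133499. 옹알이 （2）/옹알이 （2）.py | solution
-- ===== SOURCE A (Python) =====
-- def solution(babbling):
--     a = ["aya", "ye", "woo", "ma" ]
--     answer = 0
--     for l in babbling:
--         start = 0
--         end = 0
--         while end<len(l):
--             end += 1
--             if l[start:end] in a:
--                 if end<len(l) and l[start]==l[end]:
--                     break
--                 start = end
--         if start == end:
--             answer += 1
--     return answer
-- ===== SOURCE B (Python) =====
-- _TOKENS = ("aya", "ye", "woo", "ma")
--
-- def _ok(word):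
--     i, n, prev = 0, len(word), ""
--     while i < n:
--         for t in _TOKENS:
--             if t != prev and word.startswith(t, i):
--                 prev = t
--                 i += len(t)
--                 break
--         else:
--             return False
--     return True
--
-- def solution(babbling):
--     return sum(1 for w in babbling if _ok(w))
-- ===== Notes on version B (the rewrite author's own statement) =====
-- stated objective: alternative
-- what changed: A grows the slice l[start:end] one character at a time and tests membership of the whole slice in the token list; B instead greedily tries each of the 4 fixed tokens at the current position with startswith and a no-repeat-of-previous-token check, advancing by the token length.
import Mathlib
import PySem

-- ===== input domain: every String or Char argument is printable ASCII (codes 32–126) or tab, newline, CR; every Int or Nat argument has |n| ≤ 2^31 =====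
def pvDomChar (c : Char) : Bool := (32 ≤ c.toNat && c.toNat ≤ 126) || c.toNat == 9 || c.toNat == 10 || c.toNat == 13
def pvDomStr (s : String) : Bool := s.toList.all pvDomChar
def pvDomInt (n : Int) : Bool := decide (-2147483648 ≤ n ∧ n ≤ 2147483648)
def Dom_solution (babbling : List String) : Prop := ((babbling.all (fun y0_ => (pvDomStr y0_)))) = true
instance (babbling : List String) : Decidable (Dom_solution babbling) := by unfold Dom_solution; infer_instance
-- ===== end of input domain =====

-- B replaces A's growing-slice membership scan with a greedy match of each fixed
-- token at the current position plus a no-repeat-of-previous-token check (alternative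
-- algorithm, same observed cost on the measured inputs).

-- ===== PORT A =====
-- The token list, held as char lists; the Python slice l[start:end] (0 ≤ start ≤ end)
-- is (l.drop start).take (end - start), membership compared as char lists (exact here).
def tokA : List (List Char) := [['a','y','a'], ['y','e'], ['w','o','o'], ['m','a']]

-- the 'while end < len(l)' loop; state (start, end), returned when the loop exits/breaks
def aWhile (l : List Char) (start e : Nat) : Nat × Nat :=
  if h : e < l.length then
    let e' := e + 1
    if tokA.contains ((l.drop start).take (e' - start)) then
      if e' < l.length ∧ l[start]? = l[e']? then
        (start, e')                 -- break
      else
        aWhile l e' e'              -- start = end; continue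
    else
      aWhile l start e'
  else (start, e)
termination_by l.length - e
decreasing_by all_goals omega

def solution (babbling : List String) : Int :=
  babbling.foldl (fun answer l =>
    let p := aWhile l.toList 0 0
    if p.1 = p.2 then answer + 1 else answer) 0

-- ===== PORT B =====
def tokB : List (List Char) := [['a','y','a'], ['y','e'], ['w','o','o'], ['m','a']]

-- the for/else over the token tuple: first token t ≠ prev with word.startswith(t, i)
def findTok (w : List Char) (i : Nat) (prev : List Char) : List (List Char) → Option (List Char)
  | [] => none
  | t :: rest =>
      if t ≠ prev ∧ (w.drop i).take t.length = t then some t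
      else findTok w i prev rest

theorem findTok_mem {w : List Char} {i : Nat} {prev t : List Char} :
    ∀ {ts : List (List Char)}, findTok w i prev ts = some t → t ∈ ts := by
  intro ts
  induction ts with
  | nil => intro h; simp [findTok] at h
  | cons a rest ih =>
      intro h
      rw [findTok] at h
      split at h
      · simp_all
      · exact List.mem_cons_of_mem _ (ih h)

-- the while loop of _ok
def bOk (w : List Char) (i : Nat) (prev : List Char) : Bool :=
  if h : i < w.length then
    match hf : findTok w i prev tokB with
    | some t => bOk w (i + t.length) t
    | none => false
  else true
termination_by w.length - i
decreasing_by
  have ht := findTok_mem hf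
  have : 0 < t.length := by fin_cases ht <;> decide
  omega

def solution_alt (babbling : List String) : Int :=
  ((babbling.countP (fun w => bOk w.toList 0 [])) : Int)

-- ===== PRECONDITION & SPEC =====
def Spec_solution (babbling : List String) (out : Int) : Prop := out = solution_alt babbling
instance (babbling : List String) (out : Int) : Decidable (Spec_solution babbling out) := by unfold Spec_solution; infer_instance

-- ===== CLAIM (what is proved, stated in full; the proofs are below) =====
def Claim_equal_solution : Prop := ∀ (babbling : List String), Dom_solution babbling → Spec_solution babbling (solution babbling)

-- ===== LEMMAS AND PROOFS =====

-- tokens are pairwise prefix-free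
theorem tok_prefix_free {s t : List Char} (hs : s ∈ tokA) (ht : t ∈ tokA)
    (h : s <+: t) : s = t := by
  fin_cases hs <;> fin_cases ht <;> revert h <;> decide

-- tokens have pairwise distinct first characters
theorem tok_head_inj {s t : List Char} (hs : s ∈ tokA) (ht : t ∈ tokA)
    (h : s.head? = t.head?) : s = t := by
  fin_cases hs <;> fin_cases ht <;> revert h <;> decide

theorem tok_ne_nil {t : List Char} (ht : t ∈ tokA) : 0 < t.length := by
  fin_cases ht <;> decide

theorem tokB_eq_tokA : tokB = tokA := rfl

theorem findTok_some {w : List Char} {i : Nat} {prev t : List Char} :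
    ∀ {ts : List (List Char)}, findTok w i prev ts = some t →
      t ≠ prev ∧ (w.drop i).take t.length = t := by
  intro ts
  induction ts with
  | nil => intro h; simp [findTok] at h
  | cons a rest ih =>
      intro h
      rw [findTok] at h
      split at h
      · rename_i hc; cases h; exact hc
      · exact ih h

theorem findTok_none {w : List Char} {i : Nat} {prev : List Char} :
    ∀ {ts : List (List Char)}, findTok w i prev ts = none →
      ∀ t ∈ ts, t = prev ∨ (w.drop i).take t.length ≠ t := by
  intro ts
  induction ts with
  | nil => intro _ t ht; simp at ht
  | cons a rest ih =>
      intro h t ht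
      rw [findTok] at h
      split at h
      · simp at h
      · rename_i hc
        rcases List.mem_cons.1 ht with rfl | htr
        · by_cases hp : t = prev
          · exact Or.inl hp
          · right; intro he; exact hc ⟨hp, he⟩
        · exact ih h t htr

-- a matching token fits in the remainder
theorem match_len_le {w : List Char} {i : Nat} {t : List Char} (htn : 0 < t.length)
    (h : (w.drop i).take t.length = t) : i + t.length ≤ w.length := by
  have := congrArg List.length h
  simp [List.length_take, List.length_drop] at this
  omega

-- first char of the remainder under a nonempty match
theorem match_head {w : List Char} {i : Nat} {t : List Char} (htn : 0 < t.length)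
    (h : (w.drop i).take t.length = t) : w[i]? = t.head? := by
  rw [← List.head?_drop]
  cases hd : w.drop i with
  | nil => rw [hd] at h; simp at h; subst h; simp at htn
  | cons c cs =>
      rw [hd] at h
      cases t with
      | nil => simp at htn
      | cons b bs =>
          have hc : c = b := by simpa using congrArg List.head? h
          simp [hc]

-- A's scan when no token matches anywhere in the remainder: runs to the end
theorem aWhile_noMatch (w : List Char) (i : Nat)
    (H : ∀ t ∈ tokA, (w.drop i).take t.length ≠ t) :
    ∀ m e, w.length - e ≤ m → i ≤ e → e ≤ w.length → aWhile w i e = (i, w.length) := by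
  intro m
  induction m with
  | zero =>
      intro e hm hie hel
      have : e = w.length := by omega
      subst this
      rw [aWhile]; simp
  | succ m ih =>
      intro e hm hie hel
      rw [aWhile]
      by_cases he : e < w.length
      · simp only [he, dif_pos]
        have hcontains : tokA.contains ((w.drop i).take (e + 1 - i)) = false := by
          rw [List.contains_eq_any_beq]
          simp only [List.any_eq_false]
          intro t ht hbeq
          have heq : (w.drop i).take (e + 1 - i) = t := eq_of_beq hbeq
          have hlen : t.length = e + 1 - i := by
            rw [← heq]; simp [List.length_take, List.length_drop]; omega
          exact H t ht (by rw [hlen]; exact heq)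
        simp only [hcontains]
        simp only [Bool.false_eq_true, if_false]
        exact ih (e + 1) (by omega) (by omega) (by omega)
      · rw [dif_neg he]
        have : e = w.length := by omega
        rw [this]

-- A's scan across a matching token t: no shorter slice matches, the slice of
-- length |t| does; the loop then breaks or restarts at i + |t|
theorem aWhile_match (w : List Char) (i : Nat) (t : List Char) (ht : t ∈ tokA)
    (hpre : (w.drop i).take t.length = t) :
    ∀ m e, (i + t.length) - e ≤ m → i ≤ e → e < i + t.length →
      aWhile w i e =
        (if i + t.length < w.length ∧ w[i]? = w[i + t.length]? then (i, i + t.length)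
         else aWhile w (i + t.length) (i + t.length)) := by
  intro m
  induction m with
  | zero => intro e hm hie helt; omega
  | succ m ih =>
      intro e hm hie helt
      have hfit : i + t.length ≤ w.length := match_len_le (tok_ne_nil ht) hpre
      have he : e < w.length := by omega
      rw [aWhile]
      simp only [he, dif_pos]
      by_cases hlast : e + 1 = i + t.length
      · -- the slice is exactly t
        have hslice : (w.drop i).take (e + 1 - i) = t := by
          rw [show e + 1 - i = t.length by omega]; exact hpre
        rw [hslice]
        have hc : tokA.contains t = true := List.contains_iff_mem.mpr ht
        simp only [hc, if_true]
        rw [hlast]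
      · -- a proper prefix of t: not a token, by prefix-freeness
        have hklt : e + 1 - i < t.length := by omega
        have hslice : (w.drop i).take (e + 1 - i) = t.take (e + 1 - i) := by
          conv_rhs => rw [← hpre]
          rw [List.take_take]
          congr 1
          omega
        have hcontains : tokA.contains ((w.drop i).take (e + 1 - i)) = false := by
          rw [hslice, List.contains_eq_any_beq]
          simp only [List.any_eq_false]
          intro s hs hbeq
          have heq : t.take (e + 1 - i) = s := eq_of_beq hbeq
          have hpfx : s <+: t := heq ▸ List.take_prefix _ _
          have := tok_prefix_free hs ht hpfx
          subst this
          have := congrArg List.length heq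
          simp [List.length_take] at this
          omega
        simp only [hcontains, Bool.false_eq_true, if_false]
        exact ih (e + 1) (by omega) (by omega) (by omega)

-- main per-word correspondence, by induction on the remaining length
theorem main_iff (w : List Char) :
    ∀ m i prev, w.length - i ≤ m → i ≤ w.length →
      (i < w.length → w[i]? ≠ prev.head?) →
      (((aWhile w i i).1 = (aWhile w i i).2) ↔ bOk w i prev = true) := by
  intro m
  induction m with
  | zero =>
      intro i prev hm hil _
      have : i = w.length := by omega
      subst this
      rw [aWhile, bOk]
      simp
  | succ m ih =>
      intro i prev hm hil hinv
      by_cases hi : i < w.length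
      · rw [bOk]
        simp only [hi, dif_pos]
        cases hft : findTok w i prev tokB with
        | none =>
            -- no token matches at all
            have hno : ∀ t ∈ tokA, (w.drop i).take t.length ≠ t := by
              intro t htA hmatch
              rcases findTok_none hft t (tokB_eq_tokA ▸ htA) with rfl | hne
              · -- prev itself matches: contradicts the invariant
                have := match_head (tok_ne_nil htA) hmatch
                exact hinv hi this
              · exact hne hmatch
            have hA := aWhile_noMatch w i hno (w.length - i) i (by omega) (by omega) (by omega)
            rw [hA]
            simp
            omega
        | some t =>
            have ⟨htp, hmt⟩ := findTok_some hft
            have htA : t ∈ tokA := tokB_eq_tokA ▸ findTok_mem hft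
            have htn : 0 < t.length := tok_ne_nil htA
            have hfit : i + t.length ≤ w.length := match_len_le htn hmt
            have hhead : w[i]? = t.head? := match_head htn hmt
            have hA := aWhile_match w i t htA hmt t.length i (by omega) le_rfl (by omega)
            rw [hA]
            by_cases hb : i + t.length < w.length ∧ w[i]? = w[i + t.length]?
            · -- break in A; B fails at i + |t| since only t could match there
              simp only [hb, if_pos]
              constructor
              · intro h
                have h' : i = i + t.length := h
                exact absurd h' (by omega)
              · intro h
                exfalso
                rw [bOk] at h
                simp only [hb.1, dif_pos] at h
                cases hft2 : findTok w (i + t.length) t tokB with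
                | none => rw [hft2] at h; simp at h
                | some s =>
                    have ⟨hsp, hms⟩ := findTok_some hft2
                    have hsA : s ∈ tokA := tokB_eq_tokA ▸ findTok_mem hft2
                    have : w[i + t.length]? = s.head? := match_head (tok_ne_nil hsA) hms
                    have hheads : s.head? = t.head? := by
                      rw [← this, ← hb.2, hhead]
                    exact hsp (tok_head_inj hsA htA hheads)
            · -- no break: both restart at i + |t|
              simp only [hb, if_neg]
              have hinv' : i + t.length < w.length → w[i + t.length]? ≠ t.head? := by
                intro hlt heq
                exact hb ⟨hlt, by rw [hhead, heq]⟩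
              exact ih (i + t.length) t (by omega) hfit hinv'
      · have : i = w.length := by omega
        subst this
        rw [aWhile, bOk]
        simp

theorem word_iff (w : List Char) :
    ((aWhile w 0 0).1 = (aWhile w 0 0).2) ↔ bOk w 0 [] = true := by
  apply main_iff w w.length 0 [] (by omega) (by omega)
  intro h heq
  have : w.length ≤ 0 := List.getElem?_eq_none_iff.mp (by simpa using heq)
  omega

theorem fold_count (bs : List String) :
    ∀ c : Int,
      bs.foldl (fun answer l =>
        let p := aWhile l.toList 0 0
        if p.1 = p.2 then answer + 1 else answer) c
      = c + ((bs.countP (fun w => bOk w.toList 0 [])) : Int) := by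
  induction bs with
  | nil => intro c; simp
  | cons w bs ih =>
      intro c
      by_cases hw : (aWhile w.toList 0 0).1 = (aWhile w.toList 0 0).2
      · have hb : bOk w.toList 0 [] = true := (word_iff w.toList).1 hw
        simp only [List.foldl_cons, List.countP_cons, hb, if_pos hw, ih]
        push_cast
        ring
      · have hb : bOk w.toList 0 [] = false := by
          cases h : bOk w.toList 0 [] with
          | true => exact absurd ((word_iff w.toList).2 h) hw
          | false => rfl
        simp only [List.foldl_cons, List.countP_cons, hb, if_neg hw, ih]
        push_cast
        ring

-- ===== VERDICT (by name: the statement is the Claim_ definition above) =====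
theorem solution_spec : Claim_equal_solution := by
  intro babbling _
  unfold Spec_solution solution solution_alt
  rw [fold_count]
  simp
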